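-- pv_equiv track=rewrite | github.com/thisishwan2/Algorithm | programmers/Level2/디펜스 게임.py | solution
-- ===== SOURCE A (Python) =====
-- import heapq
--
-- def solution(n, k, enemy):
--     answer = 0
--
--     h = []
--     for i in enemy:
--         heapq.heappush(h, -i)
--         if n - i >= 0:
--             n -= i
--         else:
--             if k==0:
--                 break
--             else:
--                 k -= 1
--                 max_ = -heapq.heappop(h)
--                 n += max_-i
--
--         answer += 1
--     return answer
-- ===== SOURCE B (Python) =====
-- import heapq
--
-- def solution(n, k, enemy):
--     answer = 0
--     paid = 0
--     skipped = []
--     for e in enemy: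
--         heapq.heappush(skipped, e)
--         if len(skipped) > k:
--             paid += heapq.heappop(skipped)
--             if paid > n:
--                 break
--         answer += 1
--     return answer
-- ===== Notes on version B (the rewrite author's own statement) =====
-- stated objective: simpler
-- what changed: A keeps a max-heap of every enemy seen, decrements the remaining health n and, when a skill is forced, pops the maximum and refunds it while counting skills down; B keeps a size-k min-heap of only the skipped (largest) enemies and a monotone running total `paid` of enemies actually paid for, checked against the fixed n whenever the heap overflows.
-- outside the precondition, e.g. on solution(6, 1, [8, 0, -1, -6, 9, 5, 10, 4]): A returns 5, B returns 6; on solution(1, -1, [2, 2]): A returns 2, B returns 0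
import Mathlib
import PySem

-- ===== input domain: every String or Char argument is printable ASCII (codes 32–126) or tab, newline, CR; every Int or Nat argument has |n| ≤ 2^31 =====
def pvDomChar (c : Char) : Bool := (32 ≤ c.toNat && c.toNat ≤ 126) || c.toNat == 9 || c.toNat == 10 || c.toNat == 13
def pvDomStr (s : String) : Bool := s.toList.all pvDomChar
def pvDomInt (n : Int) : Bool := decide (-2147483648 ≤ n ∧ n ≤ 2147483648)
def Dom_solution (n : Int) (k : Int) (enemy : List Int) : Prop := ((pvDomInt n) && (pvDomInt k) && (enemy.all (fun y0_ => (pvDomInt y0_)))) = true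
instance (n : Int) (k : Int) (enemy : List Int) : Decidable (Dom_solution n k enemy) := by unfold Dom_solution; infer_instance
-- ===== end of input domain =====

-- B replaces A's max-heap of every enemy (with n decremented and the max refunded when a skill
-- is forced) by a size-k min-heap of skipped enemies and a monotone running total `paid`
-- compared against the fixed n; objective: simpler accounting, same asymptotic cost.

-- minimum of the nonempty list a :: l — the value Python's heappop returns from a heap holding them
def pyMinC (a : Int) (l : List Int) : Int := l.foldl min a

-- ===== PORT A =====
def solGo : List Int → Int → Int → List Int → Int → Int
  | [], _, _, _, answer => answer
  | i :: rest, n, k, h, answer =>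
    let h' := (-i) :: h
    if 0 ≤ n - i then
      solGo rest (n - i) k h' (answer + 1)
    else if k = 0 then answer
    else
      let mneg := pyMinC (-i) h
      solGo rest (n + (-mneg) - i) (k - 1) (h'.erase mneg) (answer + 1)

def solution (n : Int) (k : Int) (enemy : List Int) : Int := solGo enemy n k [] 0

-- ===== PORT B =====
def altGo : List Int → Int → Int → Int → List Int → Int → Int
  | [], _, _, _, _, answer => answer
  | e :: rest, n, k, paid, skipped, answer =>
    let m := pyMinC e skipped
    if k < (skipped.length : Int) + 1 then
      let paid' := paid + m
      if n < paid' then answer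
      else altGo rest n k paid' ((e :: skipped).erase m) (answer + 1)
    else altGo rest n k paid (e :: skipped) (answer + 1)

def solution_alt (n : Int) (k : Int) (enemy : List Int) : Int := altGo enemy n k 0 [] 0

-- ===== PRECONDITION & SPEC =====
-- sum of the positive entries (what surviving every round costs at most)
def posSum (l : List Int) : Int := (l.filter (fun e => 0 < e)).sum

-- Pre_ admits any input where n covers the total positive cost, and otherwise requires a
-- non-negative skill count k and, when skills actually compete with paying (0 < k < len(enemy)),
-- non-negative enemy sizes: a negative count k acts in A as unlimited skills, and negative enemy
-- values in that contested regime break the greedy exchange both programs rely on, so there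
-- neither behaviour is specified.
def Pre_solution (n : Int) (k : Int) (enemy : List Int) : Prop :=
  posSum enemy ≤ n ∨ (0 ≤ k ∧ ((∀ e ∈ enemy, 0 ≤ e) ∨ k = 0 ∨ (enemy.length : Int) ≤ k))
instance (n : Int) (k : Int) (enemy : List Int) : Decidable (Pre_solution n k enemy) := by unfold Pre_solution; infer_instance

def pvWitness_solution : Int × Int × List Int := (7, 1, [4, 2, 4, 8, 3, 3, 1])

def Spec_solution (n : Int) (k : Int) (enemy : List Int) (out : Int) : Prop := out = solution_alt n k enemy
instance (n : Int) (k : Int) (enemy : List Int) (out : Int) : Decidable (Spec_solution n k enemy out) := by unfold Spec_solution; infer_instance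

-- ===== CLAIM (what is proved, stated in full; the proofs are below) =====
def Claim_equal_solution : Prop := ∀ (n : Int) (k : Int) (enemy : List Int), Dom_solution n k enemy → Pre_solution n k enemy → Spec_solution n k enemy (solution n k enemy)

-- ===== LEMMAS AND PROOFS =====

theorem pyMinC_mem (a : Int) (l : List Int) : pyMinC a l ∈ a :: l := by
  rcases PySem.List.foldl_min_mem l a with h | h
  · rw [pyMinC, h]; exact List.mem_cons_self
  · exact List.mem_cons_of_mem _ (by rw [pyMinC]; exact h)

theorem pyMinC_le (a : Int) (l : List Int) : ∀ y ∈ a :: l, pyMinC a l ≤ y := by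
  intro y hy
  rcases List.mem_cons.mp hy with rfl | hy
  · exact (PySem.List.foldl_min_le l y).1
  · exact (PySem.List.foldl_min_le l a).2 y hy

theorem pair_sum_le (U V : Multiset Int) (hV : ∀ v ∈ V, 0 ≤ v)
    (hc : U.card ≤ V.card) (hle : ∀ u ∈ U, ∀ v ∈ V, u ≤ v) : U.sum ≤ V.sum := by
  induction U using Multiset.induction_on generalizing V with
  | empty => exact Multiset.sum_nonneg hV
  | cons a U ih =>
    have hV0 : V ≠ 0 := by intro h; subst h; simp at hc
    obtain ⟨v, hv⟩ := Multiset.exists_mem_of_ne_zero hV0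
    have hVe : v ::ₘ V.erase v = V := Multiset.cons_erase hv
    rw [← hVe, Multiset.sum_cons, Multiset.sum_cons]
    have h1 : a ≤ v := hle a (Multiset.mem_cons_self a U) v hv
    have h2 : U.sum ≤ (V.erase v).sum := by
      apply ih
      · exact fun x hx => hV x (Multiset.mem_of_mem_erase hx)
      · have := Multiset.card_erase_of_mem hv
        rw [← hVe] at hc; simp at hc; omega
      · exact fun u hu w hw => hle u (Multiset.mem_cons_of_mem hu) w (Multiset.mem_of_mem_erase hw)
    omega

theorem top_sum_ge (P S T : Multiset Int) (hS : S ≤ P)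
    (hTnn : ∀ x ∈ T, 0 ≤ x) (hc : S.card ≤ T.card)
    (htop : ∀ x ∈ P - T, ∀ y ∈ T, x ≤ y) : S.sum ≤ T.sum := by
  have hSsplit : S - T + S ∩ T = S := Multiset.sub_add_inter S T
  have hTsplit : T - S + T ∩ S = T := Multiset.sub_add_inter T S
  have hinter : S ∩ T = T ∩ S := Multiset.inter_comm S T
  have key : (S - T).sum ≤ (T - S).sum := by
    apply pair_sum_le
    · exact fun v hv => hTnn v (Multiset.mem_of_le (Multiset.sub_le_self _ _) hv)
    · have c1 : (S - T).card + (S ∩ T).card = S.card := by rw [← Multiset.card_add, hSsplit]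
      have c2 : (T - S).card + (T ∩ S).card = T.card := by rw [← Multiset.card_add, hTsplit]
      rw [hinter] at c1; omega
    · intro u hu v hv
      have huP : u ∈ P - T := by
        rw [Multiset.mem_sub] at hu ⊢
        calc Multiset.count u T < Multiset.count u S := hu
          _ ≤ Multiset.count u P := Multiset.le_iff_count.mp hS u
      exact htop u huP v (Multiset.mem_of_le (Multiset.sub_le_self _ _) hv)
  calc S.sum = (S - T).sum + (S ∩ T).sum := by rw [← Multiset.sum_add, hSsplit]
    _ ≤ (T - S).sum + (T ∩ S).sum := by rw [hinter]; omega
    _ = T.sum := by rw [← Multiset.sum_add, hTsplit]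

theorem sub_erase_cons (P SB : Multiset Int) (i m : Int) (hSB : SB ≤ P)
    (hm : m ∈ i ::ₘ SB) :
    (i ::ₘ P) - ((i ::ₘ SB).erase m) = (P - SB) + {m} := by
  ext a
  have hcount := Multiset.le_iff_count.mp hSB a
  have hme : Multiset.count a ((i ::ₘ SB).erase m) =
      Multiset.count a (i ::ₘ SB) - (if a = m then 1 else 0) := by
    by_cases h : a = m
    · subst h; simp [Multiset.count_erase_self]
    · simp [Multiset.count_erase_of_ne h, h]
  have hmc : 1 ≤ Multiset.count m (i ::ₘ SB) := Multiset.one_le_count_iff_mem.mpr hm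
  rw [Multiset.count_sub, Multiset.count_add, Multiset.count_sub, hme]
  by_cases h : a = m <;> by_cases h2 : a = i <;>
    simp [h, h2, Multiset.count_cons, Multiset.count_singleton] <;>
    subst_vars <;> simp_all [Multiset.count_cons] <;> omega

theorem topset_step (P SB : Multiset Int) (i m : Int) (hSB : SB ≤ P)
    (hm_mem : m ∈ i ::ₘ SB) (hm_min : ∀ y ∈ i ::ₘ SB, m ≤ y)
    (htop : ∀ x ∈ P - SB, ∀ y ∈ SB, x ≤ y) :
    ∀ x ∈ (i ::ₘ P) - ((i ::ₘ SB).erase m), ∀ y ∈ (i ::ₘ SB).erase m, x ≤ y := by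
  intro x hx y hy
  have hyc : y ∈ i ::ₘ SB := Multiset.mem_of_mem_erase hy
  rw [sub_erase_cons P SB i m hSB hm_mem] at hx
  rcases Multiset.mem_add.mp hx with hx | hx
  · rcases Multiset.mem_cons.mp hyc with rfl | hySB
    · by_cases hiSB : y ∈ SB
      · exact htop x hx y hiSB
      · rcases Multiset.mem_cons.mp hm_mem with rfl | hmSB
        · rw [Multiset.erase_cons_head] at hy
          exact absurd hy hiSB
        · exact le_trans (htop x hx m hmSB) (hm_min y (Multiset.mem_cons_self _ _))
    · exact htop x hx y hySB
  · rw [Multiset.mem_singleton] at hx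
    subst hx
    exact hm_min y hyc

def CInv (n0 k nA kA : Int) (R SA SB : Multiset Int) (paid : Int) : Prop :=
  (∀ x ∈ R, 0 ≤ x) ∧ (∀ x ∈ SA, 0 ≤ x) ∧
  kA = k - (SA.card : Int) ∧ 0 ≤ kA ∧
  nA = n0 - R.sum ∧ (R ≠ 0 → 0 ≤ nA) ∧
  (∀ x ∈ R, ∀ y ∈ SA, x ≤ y) ∧
  (∀ y ∈ SA, nA < y) ∧
  SB ≤ R + SA ∧ ((SB.card : Int) = min (((R + SA).card : Int)) k) ∧
  (∀ x ∈ (R + SA) - SB, ∀ y ∈ SB, x ≤ y) ∧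
  paid = ((R + SA) - SB).sum

theorem go_eq (rest : List Int) : ∀ (n0 k nA kA ans paid : Int) (hA sB : List Int) (SA : Multiset Int),
    (∀ e ∈ rest, 0 ≤ e) →
    CInv n0 k nA kA (↑(hA.map (fun x => -x))) SA (↑sB) paid →
    solGo rest nA kA hA ans = altGo rest n0 k paid sB ans := by
  induction rest with
  | nil => intro n0 k nA kA ans paid hA sB SA _ _; rfl
  | cons i rest ih =>
    intro n0 k nA kA ans paid hA sB SA hnn hInv
    obtain ⟨hRnn, hSAnn, hkA, hkA0, hnAeq, hnA0, hRSA, hI2, hSBle, hSBcard, hSBtop, hpaid⟩ := hInv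
    set R : Multiset Int := (↑(hA.map (fun x => -x)) : Multiset Int) with hRdef
    set SB : Multiset Int := (↑sB : Multiset Int) with hSBdef
    have hinn : 0 ≤ i := hnn i List.mem_cons_self
    have hrest : ∀ e ∈ rest, 0 ≤ e := fun e he => hnn e (List.mem_cons_of_mem _ he)
    have hPnn : ∀ x ∈ i ::ₘ (R + SA), 0 ≤ x := by
      intro x hx
      rcases Multiset.mem_cons.mp hx with rfl | hx
      · exact hinn
      · rcases Multiset.mem_add.mp hx with hx | hx
        · exact hRnn x hx
        · exact hSAnn x hx
    have hRsum : 0 ≤ R.sum := Multiset.sum_nonneg hRnn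
    have hSAcard : (SA.card : Int) ≤ k := by omega
    have hSAleP : SA ≤ R + SA := Multiset.le_add_left _ _
    have hSAcardP : SA.card ≤ (R + SA).card := Multiset.card_le_card hSAleP
    have hlen : (sB.length : Int) = (SB.card : Int) := by rw [hSBdef]; simp
    have hRcons : (↑(((-i) :: hA).map (fun x => -x)) : Multiset Int) = i ::ₘ R := by
      simp [hRdef]
    have hconsadd : (i ::ₘ R) + SA = i ::ₘ (R + SA) := Multiset.cons_add _ _ _
    -- facts about A's skill step (max of everything seen and not yet refunded)
    have hmneg := pyMinC_mem (-i) hA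
    have hmnegle := pyMinC_le (-i) hA
    set mneg := pyMinC (-i) hA with hmnegdef
    set m : Int := -mneg with hmdef
    have hm_mem : m ∈ i ::ₘ R := by
      have h0 : m ∈ ((-i) :: hA).map (fun x => -x) := List.mem_map_of_mem hmneg
      rw [List.map_cons, neg_neg] at h0
      rw [hRdef]
      simpa using h0
    have hm_max : ∀ x ∈ i ::ₘ R, x ≤ m := by
      intro x hx
      rw [hRdef] at hx
      have hx' : x = i ∨ x ∈ hA.map (fun x => -x) := by simpa using hx
      rcases hx' with rfl | hx'
      · have := hmnegle (-x) List.mem_cons_self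
        omega
      · obtain ⟨z, hz, rfl⟩ := List.mem_map.mp hx'
        have := hmnegle z (List.mem_cons_of_mem _ hz)
        omega
    have hRskill : (↑(((((-i) :: hA)).erase mneg).map (fun x => -x)) : Multiset Int)
        = (i ::ₘ R).erase m := by
      rw [List.map_erase (fun a b h => by dsimp at h; omega : Function.Injective (fun x : Int => -x))]
      rw [← Multiset.coe_erase, hRcons]
    by_cases hbig : k ≤ ((R + SA).card : Int)
    case neg =>
      -- fewer enemies seen than k: B has skipped everything and paid 0; A cannot have
      -- exhausted its skills
      push_neg at hbig
      have hSBeq : SB = R + SA := by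
        apply Multiset.eq_of_le_of_card_le hSBle
        have : (SB.card : Int) = ((R + SA).card : Int) := by omega
        omega
      have hpaid0 : paid = 0 := by rw [hpaid, hSBeq]; simp
      have hnopop : ¬ (k < (sB.length : Int) + 1) := by rw [hlen, hSBcard]; omega
      have hnotbreak : ¬ (kA = 0 ∧ ¬ 0 ≤ nA - i) := by
        rintro ⟨h0, _⟩; omega
      have hSB'eq : (↑(i :: sB) : Multiset Int) = (i ::ₘ R) + SA := by
        rw [← Multiset.cons_coe, ← hSBdef, hSBeq, hconsadd]
      have hBinv : ∀ R' SA' : Multiset Int, R' + SA' = i ::ₘ (R + SA) →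
          (↑(i :: sB) : Multiset Int) ≤ R' + SA' ∧
          (((↑(i :: sB) : Multiset Int).card : Int) = min (((R' + SA').card : Int)) k) ∧
          (∀ x ∈ (R' + SA') - (↑(i :: sB) : Multiset Int), ∀ y ∈ (↑(i :: sB) : Multiset Int), x ≤ y) ∧
          (0 : Int) = ((R' + SA') - (↑(i :: sB) : Multiset Int)).sum := by
        intro R' SA' hP
        have he : (↑(i :: sB) : Multiset Int) = R' + SA' := by
          rw [hP, ← hconsadd, ← hSB'eq]
        refine ⟨le_of_eq he, ?_, ?_, ?_⟩
        · rw [he]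
          have : ((R' + SA').card : Int) = ((R + SA).card : Int) + 1 := by
            rw [hP]; simp
          omega
        · intro x hx; rw [he, tsub_self] at hx; exact absurd hx (Multiset.notMem_zero x)
        · rw [he, tsub_self]; simp
      simp only [solGo, altGo, if_neg hnopop, hpaid0]
      by_cases hpay : 0 ≤ nA - i
      · rw [if_pos hpay]
        apply ih n0 k (nA - i) kA (ans + 1) 0 ((-i) :: hA) (i :: sB) SA hrest
        rw [hRcons]
        obtain ⟨b1, b2, b3, b4⟩ := hBinv (i ::ₘ R) SA hconsadd
        refine ⟨?_, hSAnn, hkA, hkA0, ?_, fun _ => hpay, ?_, ?_, b1, b2, b3, b4⟩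
        · intro x hx
          rcases Multiset.mem_cons.mp hx with rfl | hx
          · exact hinn
          · exact hRnn x hx
        · rw [Multiset.sum_cons]; omega
        · intro x hx y hy
          rcases Multiset.mem_cons.mp hx with rfl | hx
          · have := hI2 y hy; omega
          · exact hRSA x hx y hy
        · intro y hy; have := hI2 y hy; omega
      · have hkne : kA ≠ 0 := fun h0 => hnotbreak ⟨h0, hpay⟩
        rw [if_neg hpay, if_neg hkne]
        apply ih n0 k (nA + (-mneg) - i) (kA - 1) (ans + 1) 0
          ((((-i) :: hA)).erase mneg) (i :: sB) (m ::ₘ SA) hrest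
        rw [hRskill]
        have hconsR : m ::ₘ (i ::ₘ R).erase m = i ::ₘ R := Multiset.cons_erase hm_mem
        have hP' : (i ::ₘ R).erase m + (m ::ₘ SA) = i ::ₘ (R + SA) := by
          rw [Multiset.add_cons, ← Multiset.cons_add, hconsR, hconsadd]
        have hR'sum : ((i ::ₘ R).erase m).sum = i + R.sum - m := by
          have : (m ::ₘ (i ::ₘ R).erase m).sum = (i ::ₘ R).sum := by rw [hconsR]
          rw [Multiset.sum_cons, Multiset.sum_cons] at this
          omega
        have him : i ≤ m := hm_max i (Multiset.mem_cons_self _ _)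
        have hR'nn : ∀ x ∈ (i ::ₘ R).erase m, 0 ≤ x := by
          intro x hx
          have hx' := Multiset.mem_of_mem_erase hx
          rcases Multiset.mem_cons.mp hx' with rfl | hx'
          · exact hinn
          · exact hRnn x hx'
        obtain ⟨b1, b2, b3, b4⟩ := hBinv _ _ hP'
        refine ⟨hR'nn, ?_, ?_, by omega, ?_, ?_, ?_, ?_, b1, b2, b3, b4⟩
        · intro x hx
          rcases Multiset.mem_cons.mp hx with rfl | hx
          · rcases Multiset.mem_cons.mp hm_mem with h | h
            · omega
            · exact hRnn _ h
          · exact hSAnn x hx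
        · rw [Multiset.card_cons]; push_cast; omega
        · rw [hR'sum]; omega
        · intro hR'
          rcases Multiset.mem_cons.mp hm_mem with h | h
          · by_cases hR : R = 0
            · exact absurd (by rw [h, hR, Multiset.erase_cons_head]) hR'
            · have := hnA0 hR; omega
          · have hRne : R ≠ 0 := fun h0 => by rw [h0] at h; exact Multiset.notMem_zero _ h
            have := hnA0 hRne
            have := him
            omega
        · intro x hx y hy
          have hx' := Multiset.mem_of_mem_erase hx
          rcases Multiset.mem_cons.mp hy with hye | hySA
          · subst hye; exact hm_max x hx'
          · rcases Multiset.mem_cons.mp hx' with hxe | hx''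
            · subst hxe
              by_cases hiR : x ∈ R
              · exact hRSA x hiR y hySA
              · rcases Multiset.mem_cons.mp hm_mem with h | h
                · rw [h, Multiset.erase_cons_head] at hx
                  exact absurd hx hiR
                · exact le_trans him (hRSA m h y hySA)
            · exact hRSA x hx'' y hySA
        · intro y hy
          rcases Multiset.mem_cons.mp hy with hye | hySA
          · subst hye; omega
          · rcases Multiset.mem_cons.mp hm_mem with h | h
            · have := hI2 y hySA; omega
            · have := hRSA m h y hySA; have := hI2 y hySA; omega
    case pos =>
      -- at least k enemies seen: B's skipped heap is full (size k) and pops on every push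
      have hSBcardk : (SB.card : Int) = k := by omega
      have hpop : k < (sB.length : Int) + 1 := by omega
      have hm'c := pyMinC_mem i sB
      have hm'l := pyMinC_le i sB
      set m' := pyMinC i sB with hm'def
      have hm'_mem : m' ∈ i ::ₘ SB := by
        simpa using hm'c
      have hm'_min : ∀ y ∈ i ::ₘ SB, m' ≤ y := by
        intro y hy
        exact hm'l y (by simpa using hy)
      have hSB'coe : (↑((i :: sB).erase m') : Multiset Int) = (i ::ₘ SB).erase m' := by
        rw [← Multiset.coe_erase, hSBdef, Multiset.cons_coe]
      set SB' := (i ::ₘ SB).erase m' with hSB'def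
      have hsub : (i ::ₘ (R + SA)) - SB' = ((R + SA) - SB) + {m'} :=
        sub_erase_cons _ _ _ _ hSBle hm'_mem
      have htop' := topset_step _ _ _ _ hSBle hm'_mem hm'_min hSBtop
      have hSB'le : SB' ≤ i ::ₘ (R + SA) :=
        le_trans (Multiset.erase_le _ _) (Multiset.cons_le_cons _ hSBle)
      have hSB'card : (SB'.card : Int) = k := by
        rw [hSB'def, Multiset.card_erase_of_mem hm'_mem, Multiset.card_cons]
        simp; omega
      have hSB'nn : ∀ x ∈ SB', 0 ≤ x := fun x hx => hPnn x (Multiset.mem_of_le hSB'le hx)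
      have hpaid' : paid + m' = ((i ::ₘ (R + SA)) - SB').sum := by
        rw [hsub, Multiset.sum_add, Multiset.sum_singleton, hpaid]
      have hsumsplit : ((i ::ₘ (R + SA)) - SB').sum + SB'.sum = i + (R.sum + SA.sum) := by
        have h1 : ((i ::ₘ (R + SA)) - SB') + SB' = i ::ₘ (R + SA) :=
          Multiset.sub_add_cancel hSB'le
        have h2 : (((i ::ₘ (R + SA)) - SB') + SB').sum = (i ::ₘ (R + SA)).sum := by rw [h1]
        rw [Multiset.sum_add, Multiset.sum_cons, Multiset.sum_add] at h2
        omega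
      have hBinv : ∀ R' SA' : Multiset Int, R' + SA' = i ::ₘ (R + SA) →
          (↑((i :: sB).erase m') : Multiset Int) ≤ R' + SA' ∧
          ((((↑((i :: sB).erase m') : Multiset Int)).card : Int) = min (((R' + SA').card : Int)) k) ∧
          (∀ x ∈ (R' + SA') - (↑((i :: sB).erase m') : Multiset Int),
            ∀ y ∈ (↑((i :: sB).erase m') : Multiset Int), x ≤ y) ∧
          (paid + m' = ((R' + SA') - (↑((i :: sB).erase m') : Multiset Int)).sum) := by
        intro R' SA' hP
        rw [hSB'coe, hP]
        refine ⟨hSB'le, ?_, htop', hpaid'⟩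
        have : ((i ::ₘ (R + SA)).card : Int) = ((R + SA).card : Int) + 1 := by simp
        omega
      by_cases hpay : 0 ≤ nA - i
      · -- A pays; B cannot break either
        have hge : SA.sum ≤ SB'.sum := by
          apply top_sum_ge (i ::ₘ (R + SA)) SA SB'
            (le_trans hSAleP (Multiset.le_cons_self _ _)) hSB'nn ?_ htop'
          have : (SA.card : Int) ≤ (SB'.card : Int) := by omega
          exact_mod_cast this
        have hnb : ¬ (n0 < paid + pyMinC i sB) := by
          show ¬ (n0 < paid + m')
          rw [hpaid']; omega
        simp only [solGo, altGo, if_pos hpop, if_pos hpay, if_neg hnb]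
        apply ih n0 k (nA - i) kA (ans + 1) (paid + m')
          ((-i) :: hA) ((i :: sB).erase m') SA hrest
        rw [hRcons]
        obtain ⟨b1, b2, b3, b4⟩ := hBinv (i ::ₘ R) SA hconsadd
        refine ⟨?_, hSAnn, hkA, hkA0, ?_, fun _ => hpay, ?_, ?_, b1, b2, b3, b4⟩
        · intro x hx
          rcases Multiset.mem_cons.mp hx with rfl | hx
          · exact hinn
          · exact hRnn x hx
        · rw [Multiset.sum_cons]; omega
        · intro x hx y hy
          rcases Multiset.mem_cons.mp hx with rfl | hx
          · have := hI2 y hy; omega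
          · exact hRSA x hx y hy
        · intro y hy; have := hI2 y hy; omega
      · by_cases hk0 : kA = 0
        · -- A breaks; show B breaks too
          have hSAk : (SA.card : Int) = k := by omega
          have hbreak : n0 < paid + pyMinC i sB := by
            show n0 < paid + m'
            by_cases hcase : ∀ y ∈ SA, i ≤ y
            · -- SA itself is still a top set of the new prefix
              have hdiff : (i ::ₘ (R + SA)) - SA = i ::ₘ R := by
                rw [← hconsadd, Multiset.add_sub_cancel_right]
              have htopSA : ∀ x ∈ (i ::ₘ (R + SA)) - SA, ∀ y ∈ SA, x ≤ y := by
                rw [hdiff]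
                intro x hx y hy
                rcases Multiset.mem_cons.mp hx with rfl | hx
                · exact hcase y hy
                · exact hRSA x hx y hy
              have hle2 : SB'.sum ≤ SA.sum := by
                apply top_sum_ge (i ::ₘ (R + SA)) SB' SA hSB'le hSAnn ?_ htopSA
                have : (SB'.card : Int) ≤ (SA.card : Int) := by omega
                exact_mod_cast this
              rw [hpaid']; omega
            · push_neg at hcase
              obtain ⟨mu0, hmu0, hmu0i⟩ := hcase
              have hSAne : SA ≠ 0 := fun h => by rw [h] at hmu0; exact Multiset.notMem_zero _ hmu0
              rcases hl : SA.toList with _ | ⟨a, t⟩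
              · exact absurd (Multiset.toList_eq_nil.mp hl) hSAne
              have hmuc := pyMinC_mem a t
              have hmul := pyMinC_le a t
              set mu := pyMinC a t with hmudef
              have hmumem : mu ∈ SA := by
                rw [← Multiset.mem_toList, hl]; exact hmuc
              have hmumin : ∀ y ∈ SA, mu ≤ y := by
                intro y hy
                exact hmul y (by rw [← hl, Multiset.mem_toList]; exact hy)
              have hmui : mu < i := lt_of_le_of_lt (hmumin mu0 hmu0) hmu0i
              set S'' := i ::ₘ SA.erase mu with hS''def
              have hS''le : S'' ≤ i ::ₘ (R + SA) :=
                Multiset.cons_le_cons _ (le_trans (Multiset.erase_le _ _) hSAleP)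
              have hS''card : (S''.card : Int) = k := by
                rw [hS''def, Multiset.card_cons, Multiset.card_erase_of_mem hmumem,
                  Nat.pred_eq_sub_one]
                have h1 : 1 ≤ SA.card := Multiset.card_pos.mpr hSAne
                omega
              have hS''nn : ∀ x ∈ S'', 0 ≤ x := fun x hx => hPnn x (Multiset.mem_of_le hS''le hx)
              have hconsmu : mu ::ₘ SA.erase mu = SA := Multiset.cons_erase hmumem
              have hS''sum : S''.sum = i + SA.sum - mu := by
                have : (mu ::ₘ SA.erase mu).sum = SA.sum := by rw [hconsmu]
                rw [Multiset.sum_cons] at this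
                rw [hS''def, Multiset.sum_cons]
                omega
              have hdiff : (i ::ₘ (R + SA)) - S'' = R + {mu} := by
                have e1 : SA - SA.erase mu = {mu} := by
                  have h0 : ({mu} + SA.erase mu) - SA.erase mu = {mu} :=
                    Multiset.add_sub_cancel_right
                  rwa [Multiset.singleton_add, hconsmu] at h0
                have e2 : SA.erase mu ≤ SA := Multiset.erase_le _ _
                rw [hS''def, ← Multiset.singleton_add i (R + SA), ← Multiset.singleton_add i (SA.erase mu),
                  add_tsub_add_eq_tsub_left, add_tsub_assoc_of_le e2, e1]
              have htopS'' : ∀ x ∈ (i ::ₘ (R + SA)) - S'', ∀ y ∈ S'', x ≤ y := by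
                rw [hdiff]
                intro x hx y hy
                have hy' := Multiset.mem_cons.mp hy
                rcases Multiset.mem_add.mp hx with hx | hx
                · rcases hy' with rfl | hy''
                  · exact le_trans (hRSA x hx mu hmumem) (le_of_lt hmui)
                  · exact hRSA x hx y (Multiset.mem_of_mem_erase hy'')
                · rw [Multiset.mem_singleton] at hx
                  subst hx
                  rcases hy' with rfl | hy''
                  · exact le_of_lt hmui
                  · exact hmumin y (Multiset.mem_of_mem_erase hy'')
              have hle2 : SB'.sum ≤ S''.sum := by
                apply top_sum_ge (i ::ₘ (R + SA)) SB' S'' hSB'le hS''nn ?_ htopS''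
                have : (SB'.card : Int) ≤ (S''.card : Int) := by omega
                exact_mod_cast this
              have := hI2 mu hmumem
              rw [hpaid']; omega
          simp only [solGo, altGo, if_pos hpop, if_neg hpay, if_pos hk0, if_pos hbreak]
        · -- A uses a skill; B cannot break
          have hconsR : m ::ₘ (i ::ₘ R).erase m = i ::ₘ R := Multiset.cons_erase hm_mem
          have hP' : (i ::ₘ R).erase m + (m ::ₘ SA) = i ::ₘ (R + SA) := by
            rw [Multiset.add_cons, ← Multiset.cons_add, hconsR, hconsadd]
          have hR'sum : ((i ::ₘ R).erase m).sum = i + R.sum - m := by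
            have : (m ::ₘ (i ::ₘ R).erase m).sum = (i ::ₘ R).sum := by rw [hconsR]
            rw [Multiset.sum_cons, Multiset.sum_cons] at this
            omega
          have him : i ≤ m := hm_max i (Multiset.mem_cons_self _ _)
          have hR'nn : ∀ x ∈ (i ::ₘ R).erase m, 0 ≤ x := by
            intro x hx
            have hx' := Multiset.mem_of_mem_erase hx
            rcases Multiset.mem_cons.mp hx' with rfl | hx'
            · exact hinn
            · exact hRnn x hx'
          have hge : (m ::ₘ SA).sum ≤ SB'.sum := by
            apply top_sum_ge (i ::ₘ (R + SA)) (m ::ₘ SA) SB' ?_ hSB'nn ?_ htop'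
            · rw [← hP']; exact Multiset.le_add_left _ _
            · have h1 : ((m ::ₘ SA).card : Int) = (SA.card : Int) + 1 := by simp
              have : ((m ::ₘ SA).card : Int) ≤ (SB'.card : Int) := by omega
              exact_mod_cast this
          have hnb : ¬ (n0 < paid + pyMinC i sB) := by
            show ¬ (n0 < paid + m')
            rw [hpaid']
            have h1 : (m ::ₘ SA).sum = m + SA.sum := Multiset.sum_cons _ _
            have hcast : ((R + SA).card : Int) = (R.card : Int) + (SA.card : Int) := by
              rw [Multiset.card_add]; push_cast; ring
            have hRpos : 0 < R.card := by omega
            have hRne : R ≠ 0 := fun h0 => by rw [h0] at hRpos; simp at hRpos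
            have hnn2 := hnA0 hRne
            have := him
            omega
          simp only [solGo, altGo, if_pos hpop, if_neg hpay, if_neg hk0, if_neg hnb]
          apply ih n0 k (nA + (-mneg) - i) (kA - 1) (ans + 1) (paid + m')
            ((((-i) :: hA)).erase mneg) ((i :: sB).erase m') (m ::ₘ SA) hrest
          rw [hRskill]
          obtain ⟨b1, b2, b3, b4⟩ := hBinv _ _ hP'
          refine ⟨hR'nn, ?_, ?_, by omega, ?_, ?_, ?_, ?_, b1, b2, b3, b4⟩
          · intro x hx
            rcases Multiset.mem_cons.mp hx with rfl | hx
            · rcases Multiset.mem_cons.mp hm_mem with h | h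
              · omega
              · exact hRnn _ h
            · exact hSAnn x hx
          · rw [Multiset.card_cons]; push_cast; omega
          · rw [hR'sum]; omega
          · intro hR'
            rcases Multiset.mem_cons.mp hm_mem with h | h
            · by_cases hR : R = 0
              · exact absurd (by rw [h, hR, Multiset.erase_cons_head]) hR'
              · have := hnA0 hR; omega
            · have hRne : R ≠ 0 := fun h0 => by rw [h0] at h; exact Multiset.notMem_zero _ h
              have := hnA0 hRne
              have := him
              omega
          · intro x hx y hy
            have hx' := Multiset.mem_of_mem_erase hx
            rcases Multiset.mem_cons.mp hy with hye | hySA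
            · subst hye; exact hm_max x hx'
            · rcases Multiset.mem_cons.mp hx' with hxe | hx''
              · subst hxe
                by_cases hiR : x ∈ R
                · exact hRSA x hiR y hySA
                · rcases Multiset.mem_cons.mp hm_mem with h | h
                  · rw [h, Multiset.erase_cons_head] at hx
                    exact absurd hx hiR
                  · exact le_trans him (hRSA m h y hySA)
              · exact hRSA x hx'' y hySA
          · intro y hy
            rcases Multiset.mem_cons.mp hy with hye | hySA
            · subst hye; omega
            · rcases Multiset.mem_cons.mp hm_mem with h | h
              · have := hI2 y hySA; omega
              · have := hRSA m h y hySA; have := hI2 y hySA; omega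

-- with no skills left, both programs pay cumulatively and break at the same round
theorem solGo_k0 : ∀ (rest : List Int) (nA ans : Int) (hA : List Int) (n0 paid : Int),
    nA = n0 - paid → solGo rest nA 0 hA ans = altGo rest n0 0 paid [] ans := by
  intro rest
  induction rest with
  | nil => intro nA ans hA n0 paid _; rfl
  | cons i rest ih =>
    intro nA ans hA n0 paid hn
    have hpm : pyMinC i [] = i := rfl
    simp only [solGo, altGo, hpm, List.length_nil, Nat.cast_zero, List.erase_cons_head]
    rw [if_pos (by omega : (0:Int) < 0 + 1)]
    by_cases hc : 0 ≤ nA - i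
    · rw [if_pos hc, if_neg (by omega : ¬ (n0 < paid + i))]
      exact ih (nA - i) (ans + 1) _ n0 (paid + i) (by omega)
    · rw [if_neg hc, if_pos (by omega : n0 < paid + i)]
      simp

-- with at least as many skills as remaining enemies, A never breaks
theorem solGo_bigk : ∀ (rest : List Int) (nA kA : Int) (hA : List Int) (ans : Int),
    (rest.length : Int) ≤ kA → solGo rest nA kA hA ans = ans + rest.length := by
  intro rest
  induction rest with
  | nil => intro nA kA hA ans _; simp [solGo]
  | cons i rest ih =>
    intro nA kA hA ans hlen
    rw [List.length_cons] at hlen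
    push_cast at hlen
    have hk0 : ¬ (kA = 0) := by omega
    simp only [solGo]
    by_cases hc : 0 ≤ nA - i
    · rw [if_pos hc, ih _ _ _ _ (by omega)]
      push_cast [List.length_cons]; omega
    · rw [if_neg hc, if_neg hk0, ih _ _ _ _ (by omega)]
      push_cast [List.length_cons]; omega

-- with room for every remaining enemy in the skipped heap, B never pops nor breaks
theorem altGo_nopop : ∀ (rest : List Int) (n0 k paid : Int) (sB : List Int) (ans : Int),
    ((sB.length : Int) + rest.length ≤ k) → altGo rest n0 k paid sB ans = ans + rest.length := by
  intro rest
  induction rest with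
  | nil => intro n0 k paid sB ans _; simp [altGo]
  | cons i rest ih =>
    intro n0 k paid sB ans hlen
    rw [List.length_cons] at hlen
    push_cast at hlen
    simp only [altGo]
    rw [if_neg (by omega : ¬ (k < (sB.length : Int) + 1))]
    rw [ih n0 k paid (i :: sB) (ans + 1) (by push_cast [List.length_cons]; omega)]
    push_cast [List.length_cons]; omega

theorem posSum_nonneg (l : List Int) : 0 ≤ posSum l := by
  apply List.sum_nonneg
  intro x hx
  have := List.mem_filter.mp hx
  simp at this
  omega

theorem posSum_cons (a : Int) (l : List Int) :
    posSum (a :: l) = (if 0 < a then a else 0) + posSum l := by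
  by_cases h : 0 < a <;> simp [posSum, List.filter_cons, h]

theorem posSum_perm {l l' : List Int} (h : l.Perm l') : posSum l = posSum l' := by
  exact (h.filter _).sum_eq

-- with n covering every positive enemy, A can always pay
theorem solGo_rich : ∀ (rest : List Int) (nA kA : Int) (hA : List Int) (ans : Int),
    posSum rest ≤ nA → solGo rest nA kA hA ans = ans + rest.length := by
  intro rest
  induction rest with
  | nil => intro nA kA hA ans _; simp [solGo]
  | cons i rest ih =>
    intro nA kA hA ans hsum
    rw [posSum_cons] at hsum
    have h0 := posSum_nonneg rest
    simp only [solGo]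
    rw [if_pos (by by_cases hi : 0 < i <;> simp [hi] at hsum <;> omega)]
    rw [ih (nA - i) kA _ (ans + 1) (by by_cases hi : 0 < i <;> simp [hi] at hsum <;> omega)]
    push_cast [List.length_cons]; omega

-- with n covering every positive enemy, B's paid total can never exceed n
theorem altGo_rich : ∀ (rest : List Int) (n0 k paid : Int) (sB : List Int) (ans : Int),
    paid + posSum sB + posSum rest ≤ n0 → altGo rest n0 k paid sB ans = ans + rest.length := by
  intro rest
  induction rest with
  | nil => intro n0 k paid sB ans _; simp [altGo]
  | cons i rest ih =>
    intro n0 k paid sB ans hsum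
    rw [posSum_cons] at hsum
    have h0 := posSum_nonneg rest
    have h1 := posSum_nonneg sB
    simp only [altGo]
    by_cases hpop : k < (sB.length : Int) + 1
    · rw [if_pos hpop]
      have hm := pyMinC_mem i sB
      have hperm : (i :: sB).Perm (pyMinC i sB :: (i :: sB).erase (pyMinC i sB)) :=
        List.perm_cons_erase hm
      have he : posSum (i :: sB) =
          (if 0 < pyMinC i sB then pyMinC i sB else 0) +
            posSum ((i :: sB).erase (pyMinC i sB)) := by
        rw [posSum_perm hperm, posSum_cons]
      rw [posSum_cons] at he
      have h2 := posSum_nonneg ((i :: sB).erase (pyMinC i sB))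
      have hkey : paid + pyMinC i sB + posSum ((i :: sB).erase (pyMinC i sB)) + posSum rest ≤ n0 := by
        by_cases hm0 : 0 < pyMinC i sB <;> by_cases hi : 0 < i <;>
          simp [hm0, hi] at he hsum ⊢ <;> omega
      rw [if_neg (by omega : ¬ (n0 < paid + pyMinC i sB))]
      rw [ih n0 k (paid + pyMinC i sB) _ (ans + 1) hkey]
      push_cast [List.length_cons]; omega
    · rw [if_neg hpop]
      rw [ih n0 k paid (i :: sB) (ans + 1)
        (by rw [posSum_cons]; by_cases hi : 0 < i <;> simp [hi] at hsum ⊢ <;> omega)]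
      push_cast [List.length_cons]; omega

-- ===== VERDICT (by name: the statement is the Claim_ definition above) =====
theorem solution_spec : Claim_equal_solution := by
  intro n k enemy _ hpre
  show solution n k enemy = solution_alt n k enemy
  unfold solution solution_alt
  rcases hpre with hrich | ⟨hk, hd⟩
  · rw [solGo_rich enemy n k [] 0 hrich,
      altGo_rich enemy n k 0 [] 0 (by simpa [posSum] using hrich)]
  rcases hd with henn | hk0 | hlen
  · apply go_eq enemy n k n k 0 0 [] [] 0 henn
    refine ⟨by simp, by simp, by simp, hk, by simp, by intro h; simp at h, by simp, by simp,
      by simp, ?_, by simp, by simp⟩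
    simp [min_eq_left hk]
  · subst hk0
    exact solGo_k0 enemy n 0 [] n 0 (by omega)
  · rw [solGo_bigk enemy n k [] 0 hlen, altGo_nopop enemy n k 0 [] 0 (by simpa using hlen)]
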